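-- pv_equiv track=rewrite | github.com/JacobWebsite/TheOrganizer-Labor-Research-Platform | scripts/llm_dedup/01_blocking.py | block_exact_name
-- ===== SOURCE A (Python) =====
-- from collections import defaultdict
-- from itertools import combinations
--
-- MAX_GROUP = 100  # Skip degenerate groups (e.g., blank EIN buckets)
--
-- def _pairs_from_group(ids: list, method: str, candidates: dict):
--     """Add all pairs from a group to the candidate dict."""
--     if len(ids) < 2 or len(ids) > MAX_GROUP:
--         return
--     for a, b in combinations(sorted(ids), 2):
--         key = (min(a, b), max(a, b))
--         candidates.setdefault(key, set()).add(method)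
--
-- def block_exact_name(records: list) -> dict:
--     """Strategy 2: Group by exact canonical_name."""
--     groups = defaultdict(list)
--     for r in records:
--         groups[r["canonical_name"]].append(r["master_id"])
--     cands = {}
--     for ids in groups.values():
--         _pairs_from_group(ids, "exact_name", cands)
--     return cands
-- ===== SOURCE B (Python) =====
-- MAX_GROUP = 100  # Skip degenerate groups (e.g., blank EIN buckets)
--
-- def _suffix_pairs(ids):
--     """All ordered pairs (ids[i], ids[j]) with i < j, by structural recursion."""
--     if len(ids) < 2:
--         return []
--     head, rest = ids[0], ids[1:]
--     return [(head, b) for b in rest] + _suffix_pairs(rest)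
--
-- def block_exact_name(records: list) -> dict:
--     """Strategy 2: Group by exact canonical_name."""
--     # distinct names in first-appearance order
--     names = []
--     for r in records:
--         n = r["canonical_name"]
--         if n not in names:
--             names.append(n)
--     # one flat pair list: per name, a filtering pass collects the ids
--     pairs = []
--     for n in names:
--         ids = sorted(r["master_id"] for r in records if r["canonical_name"] == n)
--         if 2 <= len(ids) <= MAX_GROUP:
--             pairs += _suffix_pairs(ids)
--     # dedup keeping first occurrence; the method set is always {"exact_name"}
--     out = {}
--     for p in pairs:
--         if p not in out:
--             out[p] = {"exact_name"}
--     return out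
-- ===== Notes on version B (the rewrite author's own statement) =====
-- stated objective: alternative
-- what changed: B replaces A's defaultdict name-to-ids grouping and per-group set-mutating setdefault with a distinct-names scan, a per-name filtering pass, recursive suffix-pair generation into one flat pair list, and a final first-occurrence dedup into the output dict.
-- outside the precondition, e.g. on block_exact_name([{'master_id': '1'}]): A raises KeyError, B raises KeyError
import Mathlib
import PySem

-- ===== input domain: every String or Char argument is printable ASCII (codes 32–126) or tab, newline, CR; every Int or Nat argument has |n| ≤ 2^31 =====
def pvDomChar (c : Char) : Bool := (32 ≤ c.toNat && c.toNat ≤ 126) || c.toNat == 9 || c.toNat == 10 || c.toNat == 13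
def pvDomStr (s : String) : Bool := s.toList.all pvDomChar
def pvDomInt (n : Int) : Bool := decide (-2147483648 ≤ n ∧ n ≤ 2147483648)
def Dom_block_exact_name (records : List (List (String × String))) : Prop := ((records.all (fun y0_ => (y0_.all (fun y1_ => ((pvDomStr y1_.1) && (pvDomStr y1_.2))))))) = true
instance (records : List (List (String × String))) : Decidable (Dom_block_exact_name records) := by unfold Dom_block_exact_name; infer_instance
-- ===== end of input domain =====

-- B replaces the name→ids hash grouping and per-group set-mutation by a distinct-names scan with
-- per-name filtering passes, one flat pair list and a final first-occurrence dedup (objective: alternative).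

-- ===== PORT A =====
-- r["k"] (KeyError excluded by Pre_)
def pvGetStr (r : List (String × String)) (k : String) : String := (PySem.Dict.mk r).getD k ""

-- _pairs_from_group: for a,b in combinations(sorted(ids),2): candidates.setdefault(key,set()).add(method)
def pvPairsFromGroup (ids : List String) (method : String)
    (candidates : PySem.Dict (String × String) (PySem.Set String)) :
    PySem.Dict (String × String) (PySem.Set String) :=
  if ids.length < 2 ∨ 100 < ids.length then candidates
  else (PySem.List.combinations (PySem.List.sorted ids (fun x => x)) 2).foldl
    (fun c pr =>
      match pr with
      | [a, b] => c.modify (min a b, max a b) PySem.Set.empty (fun s => PySem.Set.add s method)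
      | _ => c) candidates

def block_exact_name (records : List (List (String × String))) : List (String × String × List String) :=
  let groups : PySem.Dict String (List String) :=
    records.foldl (fun d r =>
      d.modify (pvGetStr r "canonical_name") [] (fun l => l ++ [pvGetStr r "master_id"])) PySem.Dict.empty
  let cands := groups.values.foldl (fun c ids => pvPairsFromGroup ids "exact_name" c) PySem.Dict.empty
  cands.items.map (fun p => (p.1.1, p.1.2, p.2))

-- ===== PORT B =====
-- _suffix_pairs: [(ids[0], b) for b in ids[1:]] + _suffix_pairs(ids[1:])
def pvSuffixPairs : List String → List (String × String)
  | [] => []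
  | a :: rest => rest.map (fun b => (a, b)) ++ pvSuffixPairs rest

def block_exact_name_alt (records : List (List (String × String))) : List (String × String × List String) :=
  -- names: "if n not in names: names.append(n)" is exactly PySem.Set.add
  let names : PySem.Set String :=
    records.foldl (fun ns r => PySem.Set.add ns (pvGetStr r "canonical_name")) []
  let pairs := names.foldl (fun ps n =>
      let ids := PySem.List.sorted
        ((records.filter (fun r => pvGetStr r "canonical_name" == n)).map (fun r => pvGetStr r "master_id"))
        (fun x => x)
      if 2 ≤ ids.length ∧ ids.length ≤ 100 then ps ++ pvSuffixPairs ids else ps) []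
  let out := pairs.foldl (fun d p =>
      if d.contains p then d else d.insert p (PySem.Set.ofList ["exact_name"]))
    (PySem.Dict.empty : PySem.Dict (String × String) (PySem.Set String))
  out.items.map (fun p => (p.1.1, p.1.2, p.2))

-- ===== PRECONDITION & SPEC =====
-- Pre_ excludes exactly the records on which Python raises KeyError: a record dict missing
-- the "canonical_name" or "master_id" key.
def Pre_block_exact_name (records : List (List (String × String))) : Prop :=
  ∀ r ∈ records, (PySem.Dict.mk r).contains "canonical_name" = true ∧ (PySem.Dict.mk r).contains "master_id" = true
instance (records : List (List (String × String))) : Decidable (Pre_block_exact_name records) := by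
  unfold Pre_block_exact_name; infer_instance

def pvWitness_block_exact_name : (List (List (String × String))) :=
  [[("canonical_name", "acme"), ("master_id", "1")], [("canonical_name", "acme"), ("master_id", "2")]]

def Spec_block_exact_name (records : List (List (String × String))) (out : List (String × String × List String)) : Prop := out = block_exact_name_alt records
instance (records : List (List (String × String))) (out : List (String × String × List String)) : Decidable (Spec_block_exact_name records out) := by unfold Spec_block_exact_name; infer_instance

-- ===== CLAIM (what is proved, stated in full; the proofs are below) =====
def Claim_equal_block_exact_name : Prop := ∀ (records : List (List (String × String))), Dom_block_exact_name records → Pre_block_exact_name records → Spec_block_exact_name records (block_exact_name records)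

-- ===== LEMMAS AND PROOFS =====

-- the canonical name / master id of a record, the ids of one name-group, and the gated pair list
def pvCN (r : List (String × String)) : String := pvGetStr r "canonical_name"
def pvMI (r : List (String × String)) : String := pvGetStr r "master_id"
def pvIdsOf (records : List (List (String × String))) (n : String) : List String :=
  (records.filter (fun r => pvCN r == n)).map pvMI
def pvGatePairs (ids : List String) : List (String × String) :=
  if ids.length < 2 ∨ 100 < ids.length then [] else pvSuffixPairs (PySem.List.sorted ids (fun x => x))

-- the two dedup-insertion steps
def pvStepA (c : PySem.Dict (String × String) (PySem.Set String)) (p : String × String) :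
    PySem.Dict (String × String) (PySem.Set String) :=
  c.modify p PySem.Set.empty (fun s => PySem.Set.add s "exact_name")
def pvStepB (c : PySem.Dict (String × String) (PySem.Set String)) (p : String × String) :
    PySem.Dict (String × String) (PySem.Set String) :=
  if c.contains p then c else c.insert p (PySem.Set.ofList ["exact_name"])

def pvInv (d : PySem.Dict (String × String) (PySem.Set String)) : Prop :=
  d.keys.Nodup ∧ ∀ v ∈ d.values, v = ["exact_name"]

-- inserting the value a key already holds is a no-op
lemma pv_insert_self {κ ν : Type} [BEq κ] [LawfulBEq κ] (d : PySem.Dict κ ν) (k : κ) (v : ν)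
    (h : d.get? k = some v) (hnd : d.keys.Nodup) : d.insert k v = d := by
  apply PySem.Dict.ext
  have hc : d.contains k = true := by rw [PySem.Dict.contains_eq_isSome_get?, h]; rfl
  rw [PySem.Dict.items_insert_of_contains d v hc]
  have hcong : ∀ p ∈ d.items, (if (p.1 == k) = true then (k, v) else p) = p := by
    intro p hp
    split_ifs with hk
    · have hk' : p.1 = k := eq_of_beq hk
      have hget : d.get? p.1 = some p.2 :=
        PySem.Dict.get?_of_mem_items d (by simpa using hp) hnd
      rw [hk', h] at hget
      have hv : v = p.2 := by injection hget
      rw [← hk', hv]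
    · rfl
  rw [List.map_congr_left hcong]
  simp

lemma pv_steps_eq (d : PySem.Dict (String × String) (PySem.Set String)) (hd : pvInv d)
    (p : String × String) : pvStepA d p = pvStepB d p := by
  unfold pvStepA pvStepB PySem.Dict.modify
  by_cases hc : d.contains p = true
  · have hs : (d.get? p).isSome := by rw [← PySem.Dict.contains_eq_isSome_get?]; exact hc
    obtain ⟨v, hv⟩ := Option.isSome_iff_exists.1 hs
    have hmem : (p, v) ∈ d.items := PySem.Dict.mem_items_of_get?_eq_some d hv
    have hval : v ∈ d.values := by
      have hvals : d.values = d.items.map (fun q => q.2) := rfl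
      rw [hvals]
      exact List.mem_map_of_mem hmem
    have hv1 : v = ["exact_name"] := hd.2 v hval
    rw [if_pos hc, PySem.Dict.getD_of_get?_eq_some _ _ hv, hv1]
    have hadd : PySem.Set.add (["exact_name"] : PySem.Set String) "exact_name" = ["exact_name"] := rfl
    show d.insert p (PySem.Set.add ["exact_name"] "exact_name") = d
    rw [hadd]
    exact pv_insert_self d p _ (hv1 ▸ hv) hd.1
  · have hc' : d.contains p = false := by simpa using hc
    rw [if_neg hc, PySem.Dict.getD_of_not_contains _ _ hc']
    rfl

lemma pv_stepB_inv (d : PySem.Dict (String × String) (PySem.Set String)) (hd : pvInv d)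
    (p : String × String) : pvInv (pvStepB d p) := by
  unfold pvStepB
  split_ifs with hc
  · exact hd
  · refine ⟨PySem.Dict.nodup_keys_insert _ _ _ hd.1, ?_⟩
    intro v hv
    rcases PySem.Dict.mem_values_insert _ _ _ _ hv with h1 | h1
    · rw [h1]; rfl
    · exact hd.2 v h1

lemma pv_foldl_steps (ps : List (String × String)) :
    ∀ d, pvInv d → ps.foldl pvStepA d = ps.foldl pvStepB d := by
  induction ps with
  | nil => intro d _; rfl
  | cons p ps ih =>
    intro d hd
    simp only [List.foldl_cons]
    rw [pv_steps_eq d hd p]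
    exact ih _ (pv_stepB_inv d hd p)

-- combinations(xs, 2) is the suffix-pair list
lemma pv_combos2 (xs : List String) :
    PySem.List.combinations xs 2 = (pvSuffixPairs xs).map (fun p => [p.1, p.2]) := by
  induction xs with
  | nil => simp [PySem.List.combinations_nil_succ, pvSuffixPairs]
  | cons x xs ih =>
    rw [show (2 : Nat) = 1 + 1 from rfl, PySem.List.combinations_cons_succ,
      PySem.List.combinations_one]
    rw [show (1 + 1 : Nat) = 2 from rfl, ih]
    simp [pvSuffixPairs, List.map_map, Function.comp]

lemma pv_suffixPairs_le (xs : List String) (h : xs.Pairwise (· ≤ ·)) :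
    ∀ p ∈ pvSuffixPairs xs, p.1 ≤ p.2 := by
  induction xs with
  | nil => intro p hp; simp [pvSuffixPairs] at hp
  | cons x xs ih =>
    intro p hp
    rw [List.pairwise_cons] at h
    simp only [pvSuffixPairs, List.mem_append, List.mem_map] at hp
    rcases hp with ⟨b, hb, rfl⟩ | hp
    · exact h.1 b hb
    · exact ih h.2 p hp

lemma pv_pairsFromGroup_eq (ids : List String) (c : PySem.Dict (String × String) (PySem.Set String)) :
    pvPairsFromGroup ids "exact_name" c = (pvGatePairs ids).foldl pvStepA c := by
  unfold pvPairsFromGroup pvGatePairs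
  split_ifs with hgate
  · rfl
  · rw [pv_combos2, List.foldl_map]
    apply PySem.List.foldl_congr_mem
    intro acc p hp
    have hle : p.1 ≤ p.2 := by
      refine pv_suffixPairs_le _ ?_ p hp
      have := PySem.List.sorted_pairwise ids (fun x => x)
      simpa using this
    show acc.modify (min p.1 p.2, max p.1 p.2) PySem.Set.empty (fun s => PySem.Set.add s "exact_name")
        = pvStepA acc p
    rw [min_eq_left hle, max_eq_right hle]
    rfl

-- grouping: the defaultdict's keys are the distinct names in first-appearance order …
lemma pv_groups_keys (records : List (List (String × String))) :
    (records.foldl (fun d r => d.modify (pvCN r) [] (fun l => l ++ [pvMI r])) PySem.Dict.empty).keys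
      = PySem.Set.ofList (records.map pvCN) := by
  rw [PySem.Dict.keys_foldl_modify_key records (fun r => pvCN r) []
    (fun _ r => fun l => l ++ [pvMI r]) PySem.Dict.empty]
  rfl

-- … and its value at n is the per-name filtering pass
lemma pv_groups_getD (records : List (List (String × String))) (n : String) :
    (records.foldl (fun d r => d.modify (pvCN r) [] (fun l => l ++ [pvMI r])) PySem.Dict.empty).getD n []
      = pvIdsOf records n := by
  have hmap : records.foldl (fun d r => d.modify (pvCN r) [] (fun l => l ++ [pvMI r])) PySem.Dict.empty
      = (records.map (fun r => (pvCN r, pvMI r))).foldl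
          (fun d p => d.modify p.1 [] (fun l => l ++ [p.2])) PySem.Dict.empty := by
    rw [List.foldl_map]
  rw [hmap, PySem.Dict.getD_foldl_modify_append]
  simp [List.filter_map, pvIdsOf, List.map_map, Function.comp_def]

lemma pv_groups_values (records : List (List (String × String))) :
    (records.foldl (fun d r => d.modify (pvCN r) [] (fun l => l ++ [pvMI r])) PySem.Dict.empty).values
      = (PySem.Set.ofList (records.map pvCN)).map (pvIdsOf records) := by
  have hnd : (records.foldl (fun d r => d.modify (pvCN r) [] (fun l => l ++ [pvMI r]))
      PySem.Dict.empty).keys.Nodup := by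
    refine PySem.Dict.nodup_keys_foldl_modify_key records (fun r => pvCN r) []
      (fun _ r => fun l => l ++ [pvMI r]) PySem.Dict.empty ?_
    simp [PySem.Dict.keys_empty]
  rw [PySem.Dict.values_eq_map_keys _ hnd [], pv_groups_keys]
  exact List.map_congr_left (fun n _ => pv_groups_getD records n)

-- A's whole candidate dict, over the flattened pair list
lemma pv_A_eq (records : List (List (String × String))) :
    block_exact_name records
      = ((((PySem.Set.ofList (records.map pvCN)).map (pvIdsOf records)).flatMap
            pvGatePairs).foldl pvStepB PySem.Dict.empty).items.map (fun p => (p.1.1, p.1.2, p.2)) := by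
  unfold block_exact_name
  have h1 : ∀ r : List (String × String), pvGetStr r "canonical_name" = pvCN r := fun _ => rfl
  have h2 : ∀ r : List (String × String), pvGetStr r "master_id" = pvMI r := fun _ => rfl
  simp only [h1, h2]
  rw [pv_groups_values]
  rw [PySem.List.foldl_congr_mem _ _ (fun c ids => (pvGatePairs ids).foldl pvStepA c) _
    (fun acc ids _ => pv_pairsFromGroup_eq ids acc)]
  rw [← List.foldl_flatMap]
  rw [pv_foldl_steps _ _ ⟨by simp [PySem.Dict.keys_empty], by intro v hv; simp [PySem.Dict.values, PySem.Dict.empty] at hv⟩]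

-- B's whole candidate dict, over the same flattened pair list
lemma pv_B_eq (records : List (List (String × String))) :
    block_exact_name_alt records
      = ((((PySem.Set.ofList (records.map pvCN)).map (pvIdsOf records)).flatMap
            pvGatePairs).foldl pvStepB PySem.Dict.empty).items.map (fun p => (p.1.1, p.1.2, p.2)) := by
  unfold block_exact_name_alt
  have h1 : ∀ r : List (String × String), pvGetStr r "canonical_name" = pvCN r := fun _ => rfl
  have h2 : ∀ r : List (String × String), pvGetStr r "master_id" = pvMI r := fun _ => rfl
  simp only [h1, h2]
  have hnames : records.foldl (fun ns r => PySem.Set.add ns (pvCN r)) [] =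
      PySem.Set.ofList (records.map pvCN) := by
    rw [PySem.Set.ofList_eq_foldl, List.foldl_map]
  rw [hnames]
  have hstep : ∀ (ps : List (String × String)), ∀ n ∈ PySem.Set.ofList (records.map pvCN),
      (if 2 ≤ (PySem.List.sorted (pvIdsOf records n) (fun x => x)).length ∧
          (PySem.List.sorted (pvIdsOf records n) (fun x => x)).length ≤ 100
        then ps ++ pvSuffixPairs (PySem.List.sorted (pvIdsOf records n) (fun x => x)) else ps)
      = ps ++ pvGatePairs (pvIdsOf records n) := by
    intro ps n _
    have hlen : (PySem.List.sorted (pvIdsOf records n) (fun x => x)).length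
        = (pvIdsOf records n).length := (PySem.List.sorted_perm _ _ false).length_eq
    unfold pvGatePairs
    split_ifs with hb ha
    · omega
    · rfl
    · simp
    · omega
  have h3 : ∀ n, List.map (fun r => pvMI r) (List.filter (fun r => pvCN r == n) records)
      = pvIdsOf records n := fun _ => rfl
  simp only [h3]
  rw [PySem.List.foldl_congr_mem _ _ (fun ps n => ps ++ pvGatePairs (pvIdsOf records n)) []
    (fun acc n hn => hstep acc n hn)]
  rw [PySem.List.foldl_append_eq_flatMap, List.flatMap_map]
  rfl

-- ===== VERDICT (by name: the statement is the Claim_ definition above) =====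
theorem block_exact_name_spec : Claim_equal_block_exact_name := by
  intro records _ _
  unfold Spec_block_exact_name
  rw [pv_A_eq, pv_B_eq]
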